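-- pv_equiv track=rewrite | github.com/23andMe/bonsaitree | bonsaitree/v3/pedigrees.py | get_common_anc_set
-- ===== SOURCE A (Python) =====
-- def get_one_way_paths(
--     node_dict : dict[int, dict[int, int]],
--     i : int,
-- ):
--     """
--     Find all paths extending upward/downward from i.
--
--     if node_dict is an up_node_dict, find all paths extending upward
--
--     if node_dict is a down_node_dict, find all paths extending downward
--     """
--
--     if i not in node_dict:
--         return [[i]]
--     if node_dict[i] == {}:
--         return [[i]]
--
--     path_list = []
--     for j in node_dict[i]:
--         j_paths = get_one_way_paths(node_dict, j)
--         j_paths = [[i] + p for p in j_paths]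
--         path_list += j_paths
--
--     return path_list
--
-- def get_all_id_set(
--     ped : dict[int, dict[int, int]],
-- ):
--     """
--     Get all IDs, both genotyped and ungenotyped,
--     from a node dict (up or down node dict).
--
--     Args:
--         ped: up node dict of the form
--             {node: {parent1 : deg1, parent2 : deg2}, ..}
--             Can have zero, one, or two parents per node
--
--     Returns:
--         all_id_set: all IDs (both positive and negative) in ped
--     """
--     if not ped:
--         return set()
--     else:
--         return {*ped} | set.union(*[{*v} for v in ped.values()])
--
-- def get_common_anc_set(
--     up_dct : dict[int, dict[int, int]],
--     id_set : set[int],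
-- ):
--     """
--     Get all common ancestors of the nodes
--     in id_set.
--
--     Can be empty if nodes have no shared
--     common ancestor.
--
--     Args:
--         up_dct: an up node dict of the form
--                 {node: {p1 : d1, p2 : d2}, ...}
--                 values may have 0, 1, or 2 keys
--         id_set: A set of integer IDs
--
--     Returns:
--         anc_set: set of common ancestors
--                  of nodes in id_set.
--     """
--
--     all_id_set = get_all_id_set(up_dct)
--
--     anc_set = all_id_set
--     for node in id_set:
--         # get all paths extending up from node
--         anc_path_list = get_one_way_paths(
--             node_dict=up_dct,
--             i=node,
--         )
--
--         # get all ancestors of node including node itself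
--         node_anc_set = set()
--         for anc_path in anc_path_list:
--             node_anc_set |= {*anc_path}
--
--         # intersect all ancestors of node
--         # with ancestors of everyone else.
--         anc_set &= node_anc_set
--
--     return anc_set
-- ===== SOURCE B (Python) =====
-- def get_common_anc_set(up_dct, id_set):
--     """Common ancestors of the nodes in id_set, via an iterative upward
--     DFS per node instead of enumerating every upward path."""
--     all_ids = set(up_dct)
--     for parents in up_dct.values():
--         all_ids.update(parents)
--     anc_set = all_ids
--     for node in id_set:
--         reach = {node}
--         stack = [node]
--         while stack:
--             cur = stack.pop()
--             for parent in up_dct.get(cur, ()):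
--                 if parent not in reach:
--                     reach.add(parent)
--                     stack.append(parent)
--         anc_set = anc_set & reach
--     return anc_set
-- ===== Notes on version B (the rewrite author's own statement) =====
-- stated objective: alternative
-- what changed: Instead of recursively enumerating every upward path from each node and unioning their elements, B does one iterative stack-based upward DFS per node, collecting the reachable ancestor set directly, and intersects these sets.
-- crash fix: On inputs where some node of id_set can reach a cycle of the up-dict, A's unbounded recursion raises RecursionError; B's iterative DFS terminates and returns the common-ancestor set (e.g. {1} for up_dct={1:{1:1}}, id_set={1}). — e.g. on get_common_anc_set([(1, [(1, 1)])], [1]): A raises RecursionError, B returns [1]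
import Mathlib
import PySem

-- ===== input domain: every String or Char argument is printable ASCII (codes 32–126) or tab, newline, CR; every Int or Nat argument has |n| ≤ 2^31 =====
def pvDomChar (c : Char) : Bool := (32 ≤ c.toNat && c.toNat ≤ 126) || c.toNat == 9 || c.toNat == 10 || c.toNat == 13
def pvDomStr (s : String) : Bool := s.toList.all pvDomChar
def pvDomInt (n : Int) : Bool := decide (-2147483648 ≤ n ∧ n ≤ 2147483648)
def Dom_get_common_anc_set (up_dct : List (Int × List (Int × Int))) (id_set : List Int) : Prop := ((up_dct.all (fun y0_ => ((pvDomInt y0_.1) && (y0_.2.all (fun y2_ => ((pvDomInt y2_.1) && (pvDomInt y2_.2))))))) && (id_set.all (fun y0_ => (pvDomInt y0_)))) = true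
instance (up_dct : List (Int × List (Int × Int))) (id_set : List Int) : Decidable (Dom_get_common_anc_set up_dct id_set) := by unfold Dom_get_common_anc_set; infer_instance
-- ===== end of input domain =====

-- B replaces A's recursive enumeration of all upward paths by one iterative
-- stack-based upward DFS per node of id_set (objective: alternative algorithm).
-- Python returns a set; output lists are compared as finite sets, and both ports
-- produce the identical list (first-insertion order of A's all_id_set).

-- ===== PORT A =====
-- dict lookup (first match) used by A's `i not in node_dict` / `node_dict[i]`
def pvA_get? (d : List (Int × List (Int × Int))) (i : Int) : Option (List (Int × Int)) :=
  (d.find? (fun p => p.1 == i)).map (·.2)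

-- get_one_way_paths, with fuel: the Lean recursion is fuelled; Pre_ (no node of
-- id_set reaches a cycle) guarantees every node is reached within
-- all_id_set.length + 1 recursion levels, and elements beyond exhausted fuel
-- contribute nothing new (proved below), so the port is exact wherever Python A returns.
def pvA_paths (d : List (Int × List (Int × Int))) : Nat → Int → List (List Int)
  | 0, i => [[i]]
  | fuel+1, i =>
    match pvA_get? d i with
    | none => [[i]]                        -- i not in node_dict
    | some m =>
      if m = [] then [[i]]                 -- node_dict[i] == {}
      else
        (PySem.List.dedup (m.map (·.1))).foldl
          (fun path_list j => path_list ++ (pvA_paths d fuel j).map (fun p => i :: p)) []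

-- get_all_id_set
def pvA_all_id_set (ped : List (Int × List (Int × Int))) : List Int :=
  match ped.map (fun p => PySem.Set.ofList (p.2.map (·.1))) with
  | [] => PySem.Set.empty                  -- `if not ped: return set()`
  | v :: vs =>                             -- {*ped} | set.union(*[{*v} for v in ped.values()])
    PySem.Set.union (PySem.Set.ofList (ped.map (·.1))) (vs.foldl PySem.Set.union v)

def get_common_anc_set (up_dct : List (Int × List (Int × Int))) (id_set : List Int) : List Int :=
  let all_id_set := pvA_all_id_set up_dct
  id_set.foldl
    (fun anc_set node =>
      let anc_path_list := pvA_paths up_dct (all_id_set.length + 1) node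
      let node_anc_set := anc_path_list.foldl (fun s p => PySem.Set.update s p) PySem.Set.empty
      PySem.Set.inter anc_set node_anc_set)
    all_id_set

-- ===== PORT B =====
-- `up_dct.get(cur, ())` followed by key iteration
def pvB_parents (d : List (Int × List (Int × Int))) (cur : Int) : List Int :=
  PySem.List.dedup ((((d.find? (fun p => p.1 == cur)).map (·.2)).getD []).map (·.1))

-- the `while stack:` DFS loop; fuel all_ids.length + 2 always suffices (proved below):
-- each iteration pops one element and every push strictly grows `reach`.
def pvB_dfs (d : List (Int × List (Int × Int))) : Nat → List Int → PySem.Set Int → PySem.Set Int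
  | 0, _, reach => reach
  | _+1, [], reach => reach
  | fuel+1, cur :: rest, reach =>
    let rs := (pvB_parents d cur).foldl
      (fun (rs : PySem.Set Int × List Int) p =>
        if rs.1.contains p then rs else (rs.1 ++ [p], p :: rs.2))
      (reach, rest)
    pvB_dfs d fuel rs.2 rs.1

def get_common_anc_set_alt (up_dct : List (Int × List (Int × Int))) (id_set : List Int) : List Int :=
  let all_ids := up_dct.foldl
    (fun s p => PySem.Set.update s (p.2.map (·.1)))
    (PySem.Set.ofList (up_dct.map (·.1)))
  id_set.foldl
    (fun anc_set node => PySem.Set.inter anc_set (pvB_dfs up_dct (all_ids.length + 2) [node] [node]))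
    all_ids

-- ===== PRECONDITION & SPEC =====
-- helpers for Pre_ (independent of both ports): parents of a node, and the
-- upward closure of a start set, iterated enough times to saturate.
def pvPreParents (d : List (Int × List (Int × Int))) (x : Int) : List Int :=
  PySem.List.dedup ((((d.find? (fun p => p.1 == x)).map (·.2)).getD []).map (·.1))

def pvPreBound (d : List (Int × List (Int × Int))) : Nat :=
  d.foldl (fun a p => a + 1 + p.2.length) 1

def pvPreClose (d : List (Int × List (Int × Int))) : Nat → List Int → List Int
  | 0, s => s
  | n+1, s => pvPreClose d n (s.foldl (fun acc y => PySem.Set.update acc (pvPreParents d y)) s)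

def pvPreReach (d : List (Int × List (Int × Int))) (i : Int) : List Int :=
  pvPreClose d (pvPreBound d) [i]

-- Pre_ excludes exactly the inputs on which Python A's unbounded recursion does not
-- return: those where some node of id_set can reach a node lying on a parent-cycle
-- (there A raises RecursionError; acyclic chains deeper than Python's recursion
-- limit would likewise raise, but are unreachable at the tested sizes).
def Pre_get_common_anc_set (up_dct : List (Int × List (Int × Int))) (id_set : List Int) : Prop :=
  ∀ n ∈ id_set, ∀ x ∈ pvPreReach up_dct n,
    x ∉ pvPreClose up_dct (pvPreBound up_dct) (PySem.Set.ofList (pvPreParents up_dct x))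

instance (up_dct : List (Int × List (Int × Int))) (id_set : List Int) : Decidable (Pre_get_common_anc_set up_dct id_set) := by
  unfold Pre_get_common_anc_set; infer_instance

def pvWitness_get_common_anc_set : (List (Int × List (Int × Int))) × List Int :=
  ([(3, [(1, 1), (2, 1)]), (4, [(3, 1)])], [3, 4])

-- crash-fix block: on inputs where some node of id_set reaches a cycle, A raises
-- RecursionError while B's iterative DFS returns the common-ancestor set.
def Raises_get_common_anc_set (up_dct : List (Int × List (Int × Int))) (id_set : List Int) : Prop :=
  ∃ n ∈ id_set, ∃ x ∈ pvPreReach up_dct n,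
    x ∈ pvPreClose up_dct (pvPreBound up_dct) (PySem.Set.ofList (pvPreParents up_dct x))

instance (up_dct : List (Int × List (Int × Int))) (id_set : List Int) : Decidable (Raises_get_common_anc_set up_dct id_set) := by
  unfold Raises_get_common_anc_set; infer_instance

def pvRaiseWitness_get_common_anc_set : (List (Int × List (Int × Int))) × List Int :=
  ([(1, [(1, 1)])], [1])

def pvRaiseWitnessOut_get_common_anc_set : List Int := [1]

def Spec_get_common_anc_set (up_dct : List (Int × List (Int × Int))) (id_set : List Int) (out : List Int) : Prop :=
  out = get_common_anc_set_alt up_dct id_set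

instance (up_dct : List (Int × List (Int × Int))) (id_set : List Int) (out : List Int) : Decidable (Spec_get_common_anc_set up_dct id_set out) := by
  unfold Spec_get_common_anc_set; infer_instance

-- ===== CLAIM =====
def Claim_equal_get_common_anc_set : Prop :=
  ∀ (up_dct : List (Int × List (Int × Int))) (id_set : List Int),
    Dom_get_common_anc_set up_dct id_set → Pre_get_common_anc_set up_dct id_set →
      Spec_get_common_anc_set up_dct id_set (get_common_anc_set up_dct id_set)

def Claim_raises_get_common_anc_set : Prop :=
  (∀ (up_dct : List (Int × List (Int × Int))) (id_set : List Int),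
      Dom_get_common_anc_set up_dct id_set → Raises_get_common_anc_set up_dct id_set →
        ¬ Pre_get_common_anc_set up_dct id_set) ∧
  (Dom_get_common_anc_set (pvRaiseWitness_get_common_anc_set.1) (pvRaiseWitness_get_common_anc_set.2) ∧
   Raises_get_common_anc_set (pvRaiseWitness_get_common_anc_set.1) (pvRaiseWitness_get_common_anc_set.2) ∧
   get_common_anc_set_alt (pvRaiseWitness_get_common_anc_set.1) (pvRaiseWitness_get_common_anc_set.2) = pvRaiseWitnessOut_get_common_anc_set)

-- ===== LEMMAS AND PROOFS =====

-- walks in the parent graph (proof-side specification shared by both characterizations)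
def pvWalk (d : List (Int × List (Int × Int))) : Int → List Int → Int → Prop
  | i, [], x => x = i
  | i, j :: t, x => j ∈ pvPreParents d i ∧ pvWalk d j t x

def pvAnc (d : List (Int × List (Int × Int))) (i x : Int) : Prop := ∃ t, pvWalk d i t x

-- normal form of the "all ids" set both ports compute
def pvAll (d : List (Int × List (Int × Int))) : List Int :=
  PySem.Set.ofList (d.map (·.1) ++ (d.map (fun p => p.2.map (·.1))).flatten)

lemma pvWalk_snoc (d : List (Int × List (Int × Int))) :
    ∀ (t : List Int) (i x p : Int), pvWalk d i t x → p ∈ pvPreParents d x →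
      pvWalk d i (t ++ [p]) p := by
  intro t
  induction t with
  | nil => intro i x p hw hp; cases hw; exact ⟨hp, rfl⟩
  | cons j t ih => intro i x p hw hp; exact ⟨hw.1, ih j x p hw.2 hp⟩

lemma pvPreParents_subset_all (d : List (Int × List (Int × Int))) (i j : Int)
    (h : j ∈ pvPreParents d i) : j ∈ pvAll d := by
  unfold pvPreParents at h
  cases hf : d.find? (fun p => p.1 == i) with
  | none => simp [hf] at h
  | some km =>
    simp only [hf, Option.map_some, Option.getD_some] at h
    rw [PySem.List.dedup_eq_ofList, PySem.Set.mem_ofList] at h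
    unfold pvAll
    rw [PySem.Set.mem_ofList, List.mem_append]
    right
    rw [List.mem_flatten]
    exact ⟨km.2.map (·.1), List.mem_map.2 ⟨km, List.mem_of_find?_eq_some hf, rfl⟩, h⟩

lemma pvWalk_elems_sub (d : List (Int × List (Int × Int))) :
    ∀ (t : List Int) (i x : Int), pvWalk d i t x → ∀ e ∈ t, e ∈ pvAll d := by
  intro t
  induction t with
  | nil => intro i x _ e he; cases he
  | cons j t ih =>
    intro i x hw e he
    rcases List.mem_cons.mp he with rfl | he
    · exact pvPreParents_subset_all d i _ hw.1
    · exact ih j x hw.2 e he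

lemma pvWalk_of_append (d : List (Int × List (Int × Int))) :
    ∀ (u : List Int) (i b : Int) (v : List Int) (x : Int),
      pvWalk d i (u ++ b :: v) x → pvWalk d b v x := by
  intro u
  induction u with
  | nil => intro i b v x hw; exact hw.2
  | cons j u ih => intro i b v x hw; exact ih j b v x hw.2

lemma pvWalk_shorten (d : List (Int × List (Int × Int))) :
    ∀ (n : Nat) (t : List Int) (i x : Int), t.length ≤ n → pvWalk d i t x →
      ∃ t', pvWalk d i t' x ∧ t' ⊆ t ∧ t'.Nodup := by
  intro n
  induction n with
  | zero =>
    intro t i x hl hw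
    have : t = [] := List.eq_nil_of_length_eq_zero (Nat.le_zero.1 hl)
    subst this
    exact ⟨[], hw, List.Subset.refl _, List.nodup_nil⟩
  | succ n ih =>
    intro t i x hl hw
    cases t with
    | nil => exact ⟨[], hw, List.Subset.refl _, List.nodup_nil⟩
    | cons j t2 =>
      by_cases hj : j ∈ t2
      · -- cut the walk at the later occurrence of j
        rcases List.append_of_mem hj with ⟨u, v, huv⟩
        subst huv
        have hw2 : pvWalk d j v x := pvWalk_of_append d u j j v x hw.2
        have hlen : (j :: v).length ≤ n := by
          simp only [List.length_cons, List.length_append] at hl ⊢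
          omega
        rcases ih (j :: v) i x hlen ⟨hw.1, hw2⟩ with ⟨t', h1, h2, h3⟩
        refine ⟨t', h1, fun e he => ?_, h3⟩
        rcases List.mem_cons.mp (h2 he) with rfl | he2
        · exact List.mem_cons_self
        · exact List.mem_cons_of_mem _ (by simp only [List.mem_append, List.mem_cons]; tauto)
      · rcases ih t2 j x (by simpa using Nat.lt_succ_iff.mp (by simpa using hl)) hw.2 with
          ⟨t', h1, h2, h3⟩
        refine ⟨j :: t', ⟨hw.1, h1⟩, ?_, ?_⟩
        · intro e he
          rcases List.mem_cons.mp he with rfl | he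
          · exact List.mem_cons_self
          · exact List.mem_cons_of_mem _ (h2 he)
        · exact List.nodup_cons.2 ⟨fun hc => hj (h2 hc), h3⟩

lemma pvLen_le_of_nodup_sub {t U : List Int} (h1 : t.Nodup) (h2 : t ⊆ U) :
    t.length ≤ U.length :=
  (List.Nodup.subperm h1 h2).length_le

-- ===== A-side characterization =====

lemma pvParents_eq_of_get (d : List (Int × List (Int × Int))) (i : Int)
    (m : List (Int × Int)) (h : pvA_get? d i = some m) :
    pvPreParents d i = PySem.List.dedup (m.map (·.1)) := by
  unfold pvA_get? at h
  unfold pvPreParents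
  cases hf : d.find? (fun p => p.1 == i) with
  | none => rw [hf] at h; cases h
  | some km => rw [hf] at h; simp at h; simp [h]

lemma pvParents_eq_nil_of_none (d : List (Int × List (Int × Int))) (i : Int)
    (h : pvA_get? d i = none) : pvPreParents d i = [] := by
  unfold pvA_get? at h
  unfold pvPreParents
  cases hf : d.find? (fun p => p.1 == i) with
  | none => simp [PySem.List.dedup]
  | some km => rw [hf] at h; cases h

lemma pvA_paths_ne_nil (d : List (Int × List (Int × Int))) :
    ∀ (f : Nat) (i : Int), pvA_paths d f i ≠ [] := by
  intro f
  induction f with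
  | zero => intro i; simp [pvA_paths]
  | succ f ih =>
    intro i
    unfold pvA_paths
    cases hg : pvA_get? d i with
    | none => simp
    | some m =>
      by_cases hm : m = []
      · simp [hm]
      · simp only [hm, if_false]
        rw [PySem.List.foldl_append_eq_flatMap]
        simp only [List.nil_append, ne_eq, List.flatMap_eq_nil_iff, not_forall]
        have hk : (PySem.List.dedup (m.map (·.1))) ≠ [] := by
          cases m with
          | nil => exact absurd rfl hm
          | cons q m' =>
            intro hc
            have : q.1 ∈ PySem.List.dedup ((q :: m').map (·.1)) := by
              rw [PySem.List.dedup_eq_ofList, PySem.Set.mem_ofList]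
              simp
            rw [hc] at this; cases this
        rcases List.exists_mem_of_ne_nil _ hk with ⟨j, hj⟩
        refine ⟨j, hj, ?_⟩
        rcases List.exists_mem_of_ne_nil _ (ih j) with ⟨q, hq⟩
        simp only [List.map_eq_nil_iff]
        intro hc; rw [hc] at hq; cases hq

lemma pvA_paths_sound (d : List (Int × List (Int × Int))) :
    ∀ (f : Nat) (i x : Int), (∃ p ∈ pvA_paths d f i, x ∈ p) → pvAnc d i x := by
  intro f
  induction f with
  | zero =>
    intro i x ⟨p, hp, hx⟩
    simp [pvA_paths] at hp
    subst hp
    rw [List.mem_singleton] at hx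
    exact ⟨[], hx⟩
  | succ f ih =>
    intro i x ⟨p, hp, hx⟩
    unfold pvA_paths at hp
    cases hg : pvA_get? d i with
    | none =>
      rw [hg] at hp
      simp at hp; subst hp
      rw [List.mem_singleton] at hx
      exact ⟨[], hx⟩
    | some m =>
      rw [hg] at hp
      by_cases hm : m = []
      · simp [hm] at hp; subst hp
        rw [List.mem_singleton] at hx
        exact ⟨[], hx⟩
      · simp only [hm, if_false] at hp
        rw [PySem.List.foldl_append_eq_flatMap] at hp
        simp only [List.nil_append, List.mem_flatMap, List.mem_map] at hp
        rcases hp with ⟨j, hj, q, hq, hpq⟩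
        subst hpq
        rcases List.mem_cons.mp hx with rfl | hxq
        · exact ⟨[], rfl⟩
        · rcases ih j x ⟨q, hq, hxq⟩ with ⟨t, ht⟩
          refine ⟨j :: t, ?_, ht⟩
          rw [pvParents_eq_of_get d i m hg]
          exact hj

lemma pvA_paths_self_mem (d : List (Int × List (Int × Int))) :
    ∀ (f : Nat) (i : Int), ∃ p ∈ pvA_paths d f i, i ∈ p := by
  intro f
  induction f with
  | zero => intro i; exact ⟨[i], by simp [pvA_paths]⟩
  | succ f ih =>
    intro i
    unfold pvA_paths
    cases hg : pvA_get? d i with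
    | none => exact ⟨[i], by simp⟩
    | some m =>
      by_cases hm : m = []
      · exact ⟨[i], by simp [hm]⟩
      · simp only [hm, if_false]
        rw [PySem.List.foldl_append_eq_flatMap]
        have hk : (PySem.List.dedup (m.map (·.1))) ≠ [] := by
          cases m with
          | nil => exact absurd rfl hm
          | cons q m' =>
            intro hc
            have : q.1 ∈ PySem.List.dedup ((q :: m').map (·.1)) := by
              rw [PySem.List.dedup_eq_ofList, PySem.Set.mem_ofList]
              simp
            rw [hc] at this; cases this
        rcases List.exists_mem_of_ne_nil _ hk with ⟨j, hj⟩
        rcases List.exists_mem_of_ne_nil _ (pvA_paths_ne_nil d f j) with ⟨q, hq⟩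
        refine ⟨i :: q, ?_, List.mem_cons_self⟩
        simp only [List.nil_append, List.mem_flatMap, List.mem_map]
        exact ⟨j, hj, q, hq, rfl⟩

lemma pvA_paths_complete (d : List (Int × List (Int × Int))) :
    ∀ (t : List Int) (i x : Int) (f : Nat), pvWalk d i t x → t.length < f →
      ∃ p ∈ pvA_paths d f i, x ∈ p := by
  intro t
  induction t with
  | nil =>
    intro i x f hw _
    cases hw
    exact pvA_paths_self_mem d f i
  | cons j t2 ih =>
    intro i x f hw hf
    obtain ⟨hj, hw2⟩ := hw
    cases f with
    | zero => cases hf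
    | succ f =>
      have hlt : t2.length < f := by simpa using Nat.lt_succ_iff.mp (by simpa using hf)
      -- parents of i nonempty, so pvA_get? d i = some m with m ≠ []
      cases hg : pvA_get? d i with
      | none => rw [pvParents_eq_nil_of_none d i hg] at hj; cases hj
      | some m =>
        have hpar := pvParents_eq_of_get d i m hg
        have hm : m ≠ [] := by
          intro hc; subst hc
          rw [hpar] at hj
          simp [PySem.List.dedup, PySem.Set.ofList] at hj
        rcases ih j x f hw2 hlt with ⟨q, hq, hxq⟩
        refine ⟨i :: q, ?_, List.mem_cons_of_mem _ hxq⟩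
        unfold pvA_paths
        rw [hg]
        simp only [hm, if_false]
        rw [PySem.List.foldl_append_eq_flatMap]
        simp only [List.nil_append, List.mem_flatMap, List.mem_map]
        refine ⟨j, ?_, q, hq, rfl⟩
        rw [← hpar]; exact hj

lemma pvMem_foldl_update (x : Int) :
    ∀ (ps : List (List Int)) (s : PySem.Set Int),
      x ∈ ps.foldl (fun s p => PySem.Set.update s p) s ↔ x ∈ s ∨ ∃ p ∈ ps, x ∈ p := by
  intro ps
  induction ps with
  | nil => intro s; simp
  | cons p ps ih =>
    intro s
    rw [List.foldl_cons, ih, PySem.Set.mem_update]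
    constructor
    · rintro ((h | h) | ⟨q, hq, hx⟩)
      · exact Or.inl h
      · exact Or.inr ⟨p, List.mem_cons_self, h⟩
      · exact Or.inr ⟨q, List.mem_cons_of_mem _ hq, hx⟩
    · rintro (h | ⟨q, hq, hx⟩)
      · exact Or.inl (Or.inl h)
      · rcases List.mem_cons.mp hq with rfl | hq
        · exact Or.inl (Or.inr hx)
        · exact Or.inr ⟨q, hq, hx⟩

lemma pvA_char (d : List (Int × List (Int × Int))) (i x : Int) :
    x ∈ (pvA_paths d ((pvAll d).length + 1) i).foldl
          (fun s p => PySem.Set.update s p) PySem.Set.empty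
      ↔ pvAnc d i x := by
  rw [pvMem_foldl_update]
  constructor
  · rintro (h | h)
    · cases h
    · exact pvA_paths_sound d _ i x h
  · rintro ⟨t, hw⟩
    rcases pvWalk_shorten d t.length t i x le_rfl hw with ⟨t', hw', hsub, hnd⟩
    have hlen : t'.length ≤ (pvAll d).length :=
      pvLen_le_of_nodup_sub hnd (fun e he => pvWalk_elems_sub d t i x hw e (hsub he))
    exact Or.inr (pvA_paths_complete d t' i x _ hw' (by omega))


-- ===== B-side characterization =====

lemma pvB_parents_eq (d : List (Int × List (Int × Int))) (c : Int) :
    pvB_parents d c = pvPreParents d c := rfl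

lemma pvB_fold_spec (d : List (Int × List (Int × Int))) :
    ∀ (ps : List Int) (r0 : PySem.Set Int) (s0 : List Int), r0.Nodup →
      ∃ Δ : List Int,
        ps.foldl (fun (rs : PySem.Set Int × List Int) p =>
            if rs.1.contains p then rs else (rs.1 ++ [p], p :: rs.2)) (r0, s0)
          = (r0 ++ Δ, Δ.reverse ++ s0)
        ∧ (∀ p ∈ Δ, p ∈ ps) ∧ (∀ p ∈ ps, p ∈ r0 ++ Δ) ∧ (r0 ++ Δ).Nodup := by
  intro ps
  induction ps with
  | nil =>
    intro r0 s0 hnd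
    exact ⟨[], by simp, by simp, by simp, by simpa using hnd⟩
  | cons p ps ih =>
    intro r0 s0 hnd
    rw [List.foldl_cons]
    by_cases hc : r0.contains p = true
    · rw [if_pos hc]
      rcases ih r0 s0 hnd with ⟨Δ, heq, hΔ, hps, hnd'⟩
      refine ⟨Δ, heq, fun q hq => List.mem_cons_of_mem _ (hΔ q hq), ?_, hnd'⟩
      intro q hq
      rcases List.mem_cons.mp hq with rfl | hq
      · exact List.mem_append.2 (Or.inl ((PySem.Set.contains_iff r0 q).1 hc))
      · exact hps q hq
    · rw [if_neg hc]
      have hp : p ∉ r0 := fun hm => hc ((PySem.Set.contains_iff r0 p).2 hm)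
      have hnd1 : (r0 ++ [p]).Nodup := by
        simp only [List.nodup_append, List.nodup_singleton, true_and, hnd]
        intro a ha b hb hab
        rw [List.mem_singleton] at hb
        subst hb; subst hab
        exact hp ha
      rcases ih (r0 ++ [p]) (p :: s0) hnd1 with ⟨Δ', heq, hΔ, hps, hnd'⟩
      refine ⟨p :: Δ', ?_, ?_, ?_, ?_⟩
      · rw [heq]
        simp [List.reverse_cons, List.append_assoc]
      · intro q hq
        rcases List.mem_cons.mp hq with rfl | hq
        · exact List.mem_cons_self
        · exact List.mem_cons_of_mem _ (hΔ q hq)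
      · intro q hq
        rcases List.mem_cons.mp hq with rfl | hq
        · simp
        · have := hps q hq
          simp only [List.append_assoc, List.singleton_append] at this ⊢
          exact this
      · simpa using hnd'
    

lemma pvB_dfs_spec (d : List (Int × List (Int × Int))) (U : List Int) (i : Int)
    (hPar : ∀ y p, p ∈ pvPreParents d y → p ∈ U) :
    ∀ (f : Nat) (stack reach : List Int),
      reach.Nodup → (∀ y ∈ stack, y ∈ reach) → (∀ y ∈ reach, y ∈ U) →
      (∀ y ∈ reach, y ∈ stack ∨ ∀ p ∈ pvPreParents d y, p ∈ reach) →
      (∀ y ∈ reach, pvAnc d i y) →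
      stack.length + (U.length - reach.length) < f →
      (∀ y ∈ reach, y ∈ pvB_dfs d f stack reach) ∧
      (∀ y ∈ pvB_dfs d f stack reach, ∀ p ∈ pvPreParents d y, p ∈ pvB_dfs d f stack reach) ∧
      (∀ y ∈ pvB_dfs d f stack reach, pvAnc d i y) := by
  intro f
  induction f with
  | zero => intro stack reach _ _ _ _ _ hf; exact absurd hf (Nat.not_lt_zero _)
  | succ f ih =>
    intro stack reach h1 h2 h3 h4 h5 hf
    cases stack with
    | nil =>
      simp only [pvB_dfs]
      refine ⟨fun y hy => hy, fun y hy p hp => ?_, h5⟩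
      rcases h4 y hy with hc | hc
      · cases hc
      · exact hc p hp
    | cons cur rest =>
      have hps : pvB_parents d cur = pvPreParents d cur := pvB_parents_eq d cur
      rcases pvB_fold_spec d (pvB_parents d cur) reach rest h1 with ⟨Δ, heq, hΔ, hpsm, hnd⟩
      rw [hps] at hΔ hpsm
      have hrun : pvB_dfs d (f + 1) (cur :: rest) reach
          = pvB_dfs d f (Δ.reverse ++ rest) (reach ++ Δ) := by
        simp only [pvB_dfs, heq]
      rw [hrun]
      have h3' : ∀ y ∈ reach ++ Δ, y ∈ U := by
        intro y hy
        rcases List.mem_append.1 hy with hy | hy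
        · exact h3 y hy
        · exact hPar cur y (hΔ y hy)
      have hle : (reach ++ Δ).length ≤ U.length := pvLen_le_of_nodup_sub hnd h3'
      have h2' : ∀ y ∈ Δ.reverse ++ rest, y ∈ reach ++ Δ := by
        intro y hy
        rcases List.mem_append.1 hy with hy | hy
        · exact List.mem_append.2 (Or.inr (List.mem_reverse.1 hy))
        · exact List.mem_append.2 (Or.inl (h2 y (List.mem_cons_of_mem _ hy)))
      have h4' : ∀ y ∈ reach ++ Δ,
          y ∈ Δ.reverse ++ rest ∨ ∀ p ∈ pvPreParents d y, p ∈ reach ++ Δ := by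
        intro y hy
        rcases List.mem_append.1 hy with hy | hy
        · rcases h4 y hy with hc | hc
          · rcases List.mem_cons.mp hc with rfl | hc
            · exact Or.inr (fun p hp => hpsm p hp)
            · exact Or.inl (List.mem_append.2 (Or.inr hc))
          · exact Or.inr (fun p hp => List.mem_append.2 (Or.inl (hc p hp)))
        · exact Or.inl (List.mem_append.2 (Or.inl (List.mem_reverse.2 hy)))
      have h5' : ∀ y ∈ reach ++ Δ, pvAnc d i y := by
        intro y hy
        rcases List.mem_append.1 hy with hy | hy
        · exact h5 y hy
        · rcases h5 cur (h2 cur List.mem_cons_self) with ⟨t, hw⟩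
          exact ⟨t ++ [y], pvWalk_snoc d t i cur y hw (hΔ y hy)⟩
      have hf' : (Δ.reverse ++ rest).length + (U.length - (reach ++ Δ).length) < f := by
        simp only [List.length_append, List.length_reverse, List.length_cons] at hf hle ⊢
        omega
      obtain ⟨C1, C2, C3⟩ := ih (Δ.reverse ++ rest) (reach ++ Δ) hnd h2' h3' h4' h5' hf'
      exact ⟨fun y hy => C1 y (List.mem_append.2 (Or.inl hy)), C2, C3⟩

lemma pvWalk_mem_closed (d : List (Int × List (Int × Int))) (r : List Int)
    (hcl : ∀ y ∈ r, ∀ p ∈ pvPreParents d y, p ∈ r) :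
    ∀ (t : List Int) (y x : Int), y ∈ r → pvWalk d y t x → x ∈ r := by
  intro t
  induction t with
  | nil => intro y x hy hw; cases hw; exact hy
  | cons j t ih => intro y x hy hw; exact ih j x (hcl y hy j hw.1) hw.2

lemma pvB_char (d : List (Int × List (Int × Int))) (node x : Int) :
    x ∈ pvB_dfs d ((pvAll d).length + 2) [node] [node] ↔ pvAnc d node x := by
  have hUnd : (PySem.Set.add (pvAll d) node).Nodup :=
    PySem.Set.nodup_add _ _ (PySem.Set.nodup_ofList _)
  have hUlen : (PySem.Set.add (pvAll d) node).length ≤ (pvAll d).length + 1 := by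
    rw [PySem.Set.add_eq_ite]
    split_ifs <;> simp
  have hspec := pvB_dfs_spec d (PySem.Set.add (pvAll d) node) node
    (fun y p hp => (PySem.Set.mem_add _ _ _).2 (Or.inl (pvPreParents_subset_all d y p hp)))
    ((pvAll d).length + 2) [node] [node]
    (List.nodup_singleton node)
    (fun y hy => hy)
    (fun y hy => by
      rw [List.mem_singleton] at hy
      exact (PySem.Set.mem_add _ _ _).2 (Or.inr hy))
    (fun y hy => Or.inl hy)
    (fun y hy => ⟨[], by rw [List.mem_singleton] at hy; exact hy⟩)
    (by simp only [List.length_singleton]; omega)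
  obtain ⟨C1, C2, C3⟩ := hspec
  constructor
  · exact C3 x
  · rintro ⟨t, hw⟩
    exact pvWalk_mem_closed d _ C2 t node x (C1 node List.mem_cons_self) hw

-- ===== the two "all ids" computations produce the same list =====

lemma pvUpdate_ofList_right (s : PySem.Set Int) (xs : List Int) :
    PySem.Set.update s (PySem.Set.ofList xs) = PySem.Set.update s xs := by
  induction xs using List.reverseRecOn with
  | nil => rfl
  | append_singleton xs x ih =>
    have h2 : PySem.Set.update s (xs ++ [x]) = PySem.Set.add (PySem.Set.update s xs) x := by
      simp [PySem.Set.update, List.foldl_append]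
    rw [PySem.Set.ofList_append_singleton, PySem.Set.add_eq_ite]
    split_ifs with hx
    · rw [ih, h2, PySem.Set.add_of_mem ((PySem.Set.mem_update s xs x).2 (Or.inr (by rwa [PySem.Set.mem_ofList] at hx)))]
    · have h1 : PySem.Set.update s (PySem.Set.ofList xs ++ [x])
          = PySem.Set.add (PySem.Set.update s (PySem.Set.ofList xs)) x := by
        simp [PySem.Set.update, List.foldl_append]
      rw [h1, h2, ih]

lemma pvFoldl_update_flatten {β : Type} (f : β → List Int) :
    ∀ (l : List β) (s : PySem.Set Int),
      l.foldl (fun s v => PySem.Set.update s (f v)) s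
        = PySem.Set.update s ((l.map f).flatten) := by
  intro l
  induction l with
  | nil => intro s; rfl
  | cons v l ih =>
    intro s
    rw [List.foldl_cons, ih, List.map_cons, List.flatten_cons]
    simp [PySem.Set.update, List.foldl_append]

lemma pvFoldl_union_ofList (ps : List (Int × List (Int × Int))) :
    ∀ (s : PySem.Set Int),
      ps.foldl (fun s q => PySem.Set.union s (PySem.Set.ofList (q.2.map (·.1)))) s
        = PySem.Set.update s ((ps.map (fun q => q.2.map (·.1))).flatten) := by
  induction ps with
  | nil => intro s; rfl
  | cons q ps ih =>
    intro s
    rw [List.foldl_cons, ih, List.map_cons, List.flatten_cons]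
    show PySem.Set.update (PySem.Set.update s (PySem.Set.ofList (q.2.map (·.1)))) _ = _
    rw [pvUpdate_ofList_right]
    simp [PySem.Set.update, List.foldl_append]

lemma pvA_all_eq (d : List (Int × List (Int × Int))) : pvA_all_id_set d = pvAll d := by
  cases d with
  | nil => rfl
  | cons p ps =>
    show (PySem.Set.ofList ((p :: ps).map (·.1))).union
        ((ps.map (fun q => PySem.Set.ofList (q.2.map (·.1)))).foldl PySem.Set.union
          (PySem.Set.ofList (p.2.map (·.1)))) = pvAll (p :: ps)
    have hfold :
        (ps.map (fun q => PySem.Set.ofList (q.2.map (·.1)))).foldl PySem.Set.union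
            (PySem.Set.ofList (p.2.map (·.1)))
          = PySem.Set.update (PySem.Set.ofList (p.2.map (·.1)))
              ((ps.map (fun q => q.2.map (·.1))).flatten) := by
      rw [List.foldl_map]
      exact pvFoldl_union_ofList ps _
    rw [hfold]
    show PySem.Set.update (PySem.Set.ofList ((p :: ps).map (·.1)))
        (PySem.Set.update (PySem.Set.ofList (p.2.map (·.1)))
          ((ps.map (fun q => q.2.map (·.1))).flatten)) = pvAll (p :: ps)
    rw [← PySem.Set.ofList_append (p.2.map (·.1)) ((ps.map (fun q => q.2.map (·.1))).flatten),
        pvUpdate_ofList_right, ← PySem.Set.ofList_append]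
    unfold pvAll
    rw [show List.map (fun p : Int × List (Int × Int) => List.map (fun x => x.1) p.2) (p :: ps)
          = (p.2.map (·.1)) :: ps.map (fun q => q.2.map (·.1)) from List.map_cons .., List.flatten_cons]

lemma pvB_all_eq (d : List (Int × List (Int × Int))) :
    d.foldl (fun s p => PySem.Set.update s (p.2.map (·.1)))
        (PySem.Set.ofList (d.map (·.1))) = pvAll d := by
  rw [pvFoldl_update_flatten (fun p => p.2.map (·.1)) d, ← PySem.Set.ofList_append]
  rfl

-- ===== assembling the two ports =====

lemma pvInter_congr (a s t : PySem.Set Int) (h : ∀ x, x ∈ s ↔ x ∈ t) :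
    PySem.Set.inter a s = PySem.Set.inter a t := by
  show List.filter _ a = List.filter _ a
  apply List.filter_congr
  intro x _
  rw [Bool.eq_iff_iff, PySem.Set.contains_iff, PySem.Set.contains_iff]
  exact h x

lemma pvMain (d : List (Int × List (Int × Int))) (ids : List Int) :
    get_common_anc_set d ids = get_common_anc_set_alt d ids := by
  simp only [get_common_anc_set, get_common_anc_set_alt]
  rw [pvA_all_eq, pvB_all_eq]
  apply PySem.List.foldl_congr_mem
  intro acc node _
  exact pvInter_congr _ _ _
    (fun e => (pvA_char d node e).trans (pvB_char d node e).symm)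

-- ===== VERDICT =====
theorem get_common_anc_set_spec : Claim_equal_get_common_anc_set := by
  unfold Claim_equal_get_common_anc_set
  intro up_dct id_set _ _
  unfold Spec_get_common_anc_set
  exact pvMain up_dct id_set

theorem get_common_anc_set_raises : Claim_raises_get_common_anc_set := by
  unfold Claim_raises_get_common_anc_set
  refine ⟨?_, by decide⟩
  rintro up_dct id_set _ ⟨n, hn, x, hx, hc⟩ hPre
  exact hPre n hn x hx hc

-- self-check: the crash witness indeed lies outside Pre_ (instance of the raises claim)
theorem pvRaiseWitness_outside_pre_ok :
    ¬ Pre_get_common_anc_set pvRaiseWitness_get_common_anc_set.1 pvRaiseWitness_get_common_anc_set.2 := by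
  have h := get_common_anc_set_raises
  unfold Claim_raises_get_common_anc_set at h
  exact h.1 pvRaiseWitness_get_common_anc_set.1 pvRaiseWitness_get_common_anc_set.2 h.2.1 h.2.2.1
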